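-- pv_equiv track=rewrite | github.com/emurray32/GItHub-Dossier | v2/services/ingestion_service.py | _smart_match_columns
-- ===== SOURCE A (Python) =====
-- _COLUMN_MATCHERS = [
--     ('company_name',        ['company_name', 'company', 'account_name', 'account', 'name']),
--     ('signal_description',  ['signal detail', 'signal_description', 'description', 'detail']),
--     ('website',             ['domain', 'website_url', 'website', 'url']),
--     ('signal_type',         ['signal type', 'signal_type', 'type']),
--     ('evidence_value',      ['source url', 'source_url', 'evidence_value', 'evidence']),
--     ('company_size',        ['estimated size', 'company_size', 'size', 'employees']),
--     ('industry',            ['industry', 'sector', 'vertical']),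
--     ('account_owner',       ['account_owner', 'owner', 'rep', 'assigned']),
--     ('score',               ['score', 'priority', 'weight', 'rating']),
--     ('outreach_angle',      ['outreach angle', 'outreach_angle', 'outreach', 'angle']),
--     ('status',              ['status']),
--     ('notes',               ['notes', 'comment']),
--     ('date_found',          ['date found', 'date_found', 'date', 'created']),
--     ('buyer_persona',       ['buyer persona', 'buyer_persona', 'persona']),
--     ('video_url',           ['video content url', 'video_url', 'video url', 'video']),
--     ('annual_revenue',      ['annual_revenue', 'revenue']),
-- ]
--
-- _SKIP_EXACT = {'none', ''}
--
-- def _smart_match_columns(headers):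
--     """Fuzzy-match spreadsheet headers to canonical field names.
--
--     Returns a dict of {canonical_key: original_header_name}.
--     Unmatched headers are ignored (their data lands in raw_payload).
--     """
--     mapping = {}
--     used_headers = set()
--     headers_lower = [(h or '').strip().lower() for h in headers]
--
--     for canonical, phrases in _COLUMN_MATCHERS:
--         for phrase in phrases:
--             for idx, low in enumerate(headers_lower):
--                 if low in _SKIP_EXACT or idx in used_headers:
--                     continue
--                 # "source url" should not match "website" (avoid the generic 'url' grabbing it)
--                 if low == phrase or phrase in low:
--                     mapping[canonical] = headers[idx]
--                     used_headers.add(idx)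
--                     break
--             if canonical in mapping:
--                 break
--
--     return mapping
-- ===== SOURCE B (Python) =====
-- _COLUMN_MATCHERS = [
--     ('company_name',        ['company_name', 'company', 'account_name', 'account', 'name']),
--     ('signal_description',  ['signal detail', 'signal_description', 'description', 'detail']),
--     ('website',             ['domain', 'website_url', 'website', 'url']),
--     ('signal_type',         ['signal type', 'signal_type', 'type']),
--     ('evidence_value',      ['source url', 'source_url', 'evidence_value', 'evidence']),
--     ('company_size',        ['estimated size', 'company_size', 'size', 'employees']),
--     ('industry',            ['industry', 'sector', 'vertical']),
--     ('account_owner',       ['account_owner', 'owner', 'rep', 'assigned']),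
--     ('score',               ['score', 'priority', 'weight', 'rating']),
--     ('outreach_angle',      ['outreach angle', 'outreach_angle', 'outreach', 'angle']),
--     ('status',              ['status']),
--     ('notes',               ['notes', 'comment']),
--     ('date_found',          ['date found', 'date_found', 'date', 'created']),
--     ('buyer_persona',       ['buyer persona', 'buyer_persona', 'persona']),
--     ('video_url',           ['video content url', 'video_url', 'video url', 'video']),
--     ('annual_revenue',      ['annual_revenue', 'revenue']),
-- ]
--
-- _SKIP_EXACT = {'none', ''}
--
--
-- def _first_rank(phrases, low):
--     """Index of the first phrase that occurs inside low, else None."""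
--     for r, p in enumerate(phrases):
--         if p in low:
--             return r
--     return None
--
--
-- def _smart_match_columns(headers):
--     """Fuzzy-match spreadsheet headers to canonical field names.
--
--     Same result as the phrase-major scan, but decomposed header-major: one
--     pass over the headers per canonical, keeping the best (lowest phrase
--     rank, earliest index) candidate.
--     """
--     mapping = {}
--     used_headers = set()
--     headers_lower = [(h or '').strip().lower() for h in headers]
--
--     for canonical, phrases in _COLUMN_MATCHERS:
--         best = None  # (rank, idx): smallest rank seen, earliest such idx
--         for idx, low in enumerate(headers_lower):
--             if low in _SKIP_EXACT or idx in used_headers: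
--                 continue
--             r = _first_rank(phrases, low)
--             if r is not None and (best is None or r < best[0]):
--                 best = (r, idx)
--         if best is not None:
--             mapping[canonical] = headers[best[1]]
--             used_headers.add(best[1])
--
--     return mapping
-- ===== Notes on version B (the rewrite author's own statement) =====
-- stated objective: alternative
-- what changed: Replaces A's phrase-major nested scan with break flags by a header-major pass that computes each available header's first-matching-phrase rank and keeps the argmin of (rank, index), so the per-canonical selection is a single scan over headers maintaining a best candidate.
import Mathlib
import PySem

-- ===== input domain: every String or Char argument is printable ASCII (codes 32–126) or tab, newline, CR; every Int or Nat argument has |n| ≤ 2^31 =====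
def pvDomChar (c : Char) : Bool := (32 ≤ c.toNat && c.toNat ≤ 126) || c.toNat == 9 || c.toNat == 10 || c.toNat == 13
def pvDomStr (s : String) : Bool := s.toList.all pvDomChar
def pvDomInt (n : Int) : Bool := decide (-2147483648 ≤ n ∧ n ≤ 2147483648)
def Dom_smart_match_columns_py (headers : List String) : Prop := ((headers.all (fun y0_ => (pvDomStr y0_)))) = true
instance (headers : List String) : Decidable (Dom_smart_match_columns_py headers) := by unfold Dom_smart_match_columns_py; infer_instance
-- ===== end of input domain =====

-- B selects each canonical's header by computing per-header phrase ranks and taking the argmin of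
-- (rank, index) in one pass, instead of A's phrase-major scan; same result, alternative decomposition.

-- the module constant _COLUMN_MATCHERS (shared data of both programs)
def pvMatchers : List (String × List String) :=
  [ ("company_name",       ["company_name", "company", "account_name", "account", "name"]),
    ("signal_description", ["signal detail", "signal_description", "description", "detail"]),
    ("website",            ["domain", "website_url", "website", "url"]),
    ("signal_type",        ["signal type", "signal_type", "type"]),
    ("evidence_value",     ["source url", "source_url", "evidence_value", "evidence"]),
    ("company_size",       ["estimated size", "company_size", "size", "employees"]),
    ("industry",           ["industry", "sector", "vertical"]),
    ("account_owner",      ["account_owner", "owner", "rep", "assigned"]),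
    ("score",              ["score", "priority", "weight", "rating"]),
    ("outreach_angle",     ["outreach angle", "outreach_angle", "outreach", "angle"]),
    ("status",             ["status"]),
    ("notes",              ["notes", "comment"]),
    ("date_found",         ["date found", "date_found", "date", "created"]),
    ("buyer_persona",      ["buyer persona", "buyer_persona", "persona"]),
    ("video_url",          ["video content url", "video_url", "video url", "video"]),
    ("annual_revenue",     ["annual_revenue", "revenue"]) ]

-- ===== PORT A =====
-- inner 'for idx, low in enumerate(headers_lower)' loop for one phrase: first available match
def pvAFind (phrase : String) (used : PySem.Set Int) : List (Int × String) → Option Int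
  | [] => none
  | (idx, low) :: rest =>
      if low = "none" ∨ low = "" ∨ PySem.Set.contains used idx then pvAFind phrase used rest
      else if low = phrase ∨ PySem.Str.isIn phrase low then some idx
      else pvAFind phrase used rest

-- 'for phrase in phrases' with the 'if canonical in mapping: break'
def pvAPick (used : PySem.Set Int) (pairs : List (Int × String)) : List String → Option Int
  | [] => none
  | p :: ps =>
      match pvAFind p used pairs with
      | some i => some i
      | none => pvAPick used pairs ps

-- 'for canonical, phrases in _COLUMN_MATCHERS'
def pvALoop (headers : List String) (pairs : List (Int × String)) :
    List (String × List String) → PySem.Dict String String → PySem.Set Int → PySem.Dict String String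
  | [], m, _ => m
  | (canonical, phrases) :: rest, m, used =>
      match pvAPick used pairs phrases with
      | some i =>
          pvALoop headers pairs rest (m.insert canonical (PySem.List.pyGetD headers i ""))
            (PySem.Set.add used i)
      | none => pvALoop headers pairs rest m used

def smart_match_columns_py (headers : List String) : List (String × String) :=
  -- '(h or "")' is the identity on strings ('' or '' == '')
  let headersLower := headers.map (fun h => PySem.Str.lower (PySem.Str.strip h))
  (pvALoop headers (PySem.List.enumerate headersLower 0) pvMatchers PySem.Dict.empty PySem.Set.empty).items

-- ===== PORT B =====
-- _first_rank(phrases, low): index of the first phrase occurring inside low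
def pvRank (low : String) : List String → Nat → Option Nat
  | [], _ => none
  | p :: ps, r => if PySem.Str.isIn p low then some r else pvRank low ps (r + 1)

-- one pass over the headers keeping best = (rank, idx)
def pvBBest (phrases : List String) (used : PySem.Set Int) :
    List (Int × String) → Option (Nat × Int) → Option (Nat × Int)
  | [], best => best
  | (idx, low) :: rest, best =>
      if low = "none" ∨ low = "" ∨ PySem.Set.contains used idx then pvBBest phrases used rest best
      else
        match pvRank low phrases 0 with
        | none => pvBBest phrases used rest best
        | some r =>
            match best with
            | none => pvBBest phrases used rest (some (r, idx))
            | some (br, bi) =>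
                if r < br then pvBBest phrases used rest (some (r, idx))
                else pvBBest phrases used rest (some (br, bi))

def pvBLoop (headers : List String) (pairs : List (Int × String)) :
    List (String × List String) → PySem.Dict String String → PySem.Set Int → PySem.Dict String String
  | [], m, _ => m
  | (canonical, phrases) :: rest, m, used =>
      match pvBBest phrases used pairs none with
      | some (_, i) =>
          pvBLoop headers pairs rest (m.insert canonical (PySem.List.pyGetD headers i ""))
            (PySem.Set.add used i)
      | none => pvBLoop headers pairs rest m used

def smart_match_columns_py_alt (headers : List String) : List (String × String) :=
  let headersLower := headers.map (fun h => PySem.Str.lower (PySem.Str.strip h))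
  (pvBLoop headers (PySem.List.enumerate headersLower 0) pvMatchers PySem.Dict.empty PySem.Set.empty).items

-- ===== PRECONDITION & SPEC =====
def Spec_smart_match_columns_py (headers : List String) (out : List (String × String)) : Prop := out = smart_match_columns_py_alt headers
instance (headers : List String) (out : List (String × String)) : Decidable (Spec_smart_match_columns_py headers out) := by unfold Spec_smart_match_columns_py; infer_instance

-- ===== CLAIM (what is proved, stated in full; the proofs are below) =====
def Claim_equal_smart_match_columns_py : Prop := ∀ (headers : List String), Dom_smart_match_columns_py headers → Spec_smart_match_columns_py headers (smart_match_columns_py headers)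

-- ===== LEMMAS AND PROOFS =====

-- with no phrases the best-candidate pass never updates its accumulator
theorem pvBBest_nil (used : PySem.Set Int) (pairs : List (Int × String)) (b : Option (Nat × Int)) :
    pvBBest [] used pairs b = b := by
  induction pairs generalizing b with
  | nil => rfl
  | cons hd tl ih => cases hd with | mk idx low => simp only [pvBBest, pvRank]; split_ifs <;> exact ih b

-- rank accumulator shift
theorem pvRank_shift (low : String) (phrases : List String) (r : Nat) :
    pvRank low phrases r = (pvRank low phrases 0).map (· + r) := by
  induction phrases generalizing r with
  | nil => rfl
  | cons p ps ih =>
      simp only [pvRank]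
      split_ifs with h
      · simp
      · rw [ih (r + 1), ih 1, Option.map_map]
        congr 1; funext x; simp; omega

theorem pvRank_pos (low : String) (phrases : List String) {v : Nat}
    (h : pvRank low phrases 1 = some v) : 1 ≤ v := by
  rw [pvRank_shift] at h
  rcases Option.map_eq_some_iff.mp h with ⟨w, _, hw⟩
  omega

-- once the best candidate has rank 0 it never changes
theorem pvBBest_zero (phrases : List String) (used : PySem.Set Int)
    (pairs : List (Int × String)) (i : Int) :
    pvBBest phrases used pairs (some (0, i)) = some (0, i) := by
  induction pairs with
  | nil => rfl
  | cons hd tl ih =>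
      cases hd with | mk idx low =>
      simp only [pvBBest]
      split_ifs with h
      · exact ih
      · cases hr : pvRank low phrases 0 with
        | none => exact ih
        | some r => simp only [Nat.not_lt_zero, if_false]; exact ih

-- if the head phrase matches some available header, B locks onto A's first such header
theorem pvBBest_head_match (p : String) (ps : List String) (used : PySem.Set Int)
    (pairs : List (Int × String)) (i : Int) :
    ∀ b : Option (Nat × Int), (b = none ∨ ∃ br bi, b = some (br, bi) ∧ 1 ≤ br) →
    pvAFind p used pairs = some i →
    pvBBest (p :: ps) used pairs b = some (0, i) := by
  induction pairs with
  | nil => intro b hb h; simp [pvAFind] at h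
  | cons hd tl ih =>
      obtain ⟨idx, low⟩ := hd
      intro b hb h
      simp only [pvAFind] at h
      simp only [pvBBest]
      by_cases hskip : low = "none" ∨ low = "" ∨ PySem.Set.contains used idx = true
      · rw [if_pos hskip] at h
        rw [if_pos hskip]
        exact ih b hb h
      · rw [if_neg hskip] at h
        rw [if_neg hskip]
        by_cases hmatch : low = p ∨ PySem.Str.isIn p low = true
        · rw [if_pos hmatch] at h
          obtain rfl : idx = i := by injection h
          have hin : PySem.Chars.isIn p.toList low.toList = true := by
            rw [← PySem.Str.isIn_eq]
            rcases hmatch with heq | hin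
            · rw [heq]; exact (PySem.Str.isIn_iff_infix _ _).mpr (List.infix_refl _)
            · exact hin
          have hrank : pvRank low (p :: ps) 0 = some 0 := by simp [pvRank, hin]
          rw [hrank]
          rcases hb with rfl | ⟨br, bi, rfl, hbr⟩
          · exact pvBBest_zero _ _ _ _
          · show (if 0 < br then pvBBest (p :: ps) used tl (some (0, idx))
                else pvBBest (p :: ps) used tl (some (br, bi))) = some (0, idx)
            rw [if_pos (by omega)]
            exact pvBBest_zero _ _ _ _
        · rw [if_neg hmatch] at h
          have hin : PySem.Chars.isIn p.toList low.toList = false := by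
            rw [← PySem.Str.isIn_eq]
            cases hv : PySem.Str.isIn p low
            · rfl
            · exact absurd (Or.inr hv) hmatch
          have hrank : pvRank low (p :: ps) 0 = pvRank low ps 1 := by simp [pvRank, hin]
          rw [hrank]
          cases hr : pvRank low ps 1 with
          | none => exact ih b hb h
          | some r =>
              have hr1 : 1 ≤ r := pvRank_pos _ _ hr
              rcases hb with rfl | ⟨br, bi, rfl, hbr⟩
              · exact ih _ (Or.inr ⟨r, idx, rfl, hr1⟩) h
              · show (if r < br then pvBBest (p :: ps) used tl (some (r, idx))
                    else pvBBest (p :: ps) used tl (some (br, bi))) = some (0, i)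
                split_ifs
                · exact ih _ (Or.inr ⟨r, idx, rfl, hr1⟩) h
                · exact ih _ (Or.inr ⟨br, bi, rfl, hbr⟩) h

-- if the head phrase matches no available header, B computes the tail phrases' best, ranks shifted
theorem pvBBest_head_nomatch (p : String) (ps : List String) (used : PySem.Set Int)
    (pairs : List (Int × String)) :
    ∀ b : Option (Nat × Int), pvAFind p used pairs = none →
    pvBBest (p :: ps) used pairs (b.map (fun ri => (ri.1 + 1, ri.2))) =
      (pvBBest ps used pairs b).map (fun ri => (ri.1 + 1, ri.2)) := by
  induction pairs with
  | nil => intro b h; rfl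
  | cons hd tl ih =>
      obtain ⟨idx, low⟩ := hd
      intro b h
      simp only [pvAFind] at h
      simp only [pvBBest]
      by_cases hskip : low = "none" ∨ low = "" ∨ PySem.Set.contains used idx = true
      · rw [if_pos hskip] at h
        rw [if_pos hskip, if_pos hskip]
        exact ih b h
      · rw [if_neg hskip] at h
        rw [if_neg hskip, if_neg hskip]
        by_cases hmatch : low = p ∨ PySem.Str.isIn p low = true
        · rw [if_pos hmatch] at h
          exact absurd h (by simp)
        · have hin : PySem.Chars.isIn p.toList low.toList = false := by
            rw [← PySem.Str.isIn_eq]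
            cases hv : PySem.Str.isIn p low
            · rfl
            · exact absurd (Or.inr hv) hmatch
          rw [if_neg hmatch] at h
          cases hr : pvRank low ps 0 with
          | none =>
              have hL : pvRank low (p :: ps) 0 = none := by
                simp [pvRank, hin, pvRank_shift low ps 1, hr]
              rw [hL]
              exact ih b h
          | some r =>
              have hL : pvRank low (p :: ps) 0 = some (r + 1) := by
                simp [pvRank, hin, pvRank_shift low ps 1, hr]
              rw [hL]
              cases b with
              | none => exact ih (some (r, idx)) h
              | some bp =>
                  obtain ⟨br, bi⟩ := bp
                  show (if r + 1 < br + 1 then pvBBest (p :: ps) used tl (some (r + 1, idx))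
                      else pvBBest (p :: ps) used tl (some (br + 1, bi))) =
                    (if r < br then pvBBest ps used tl (some (r, idx))
                      else pvBBest ps used tl (some (br, bi))).map (fun ri => (ri.1 + 1, ri.2))
                  by_cases hlt : r < br
                  · rw [if_pos hlt, if_pos (show r + 1 < br + 1 by omega)]
                    exact ih (some (r, idx)) h
                  · rw [if_neg hlt, if_neg (show ¬(r + 1 < br + 1) by omega)]
                    exact ih (some (br, bi)) h

-- per-canonical selection: B's argmin equals A's phrase-major first hit
theorem pvBBest_eq_pvAPick (phrases : List String) (used : PySem.Set Int)
    (pairs : List (Int × String)) :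
    (pvBBest phrases used pairs none).map (·.2) = pvAPick used pairs phrases := by
  induction phrases with
  | nil => rw [pvBBest_nil]; rfl
  | cons p ps ih =>
      cases h : pvAFind p used pairs with
      | some i =>
          rw [pvBBest_head_match p ps used pairs i none (Or.inl rfl) h]
          simp [pvAPick, h]
      | none =>
          have h2 := pvBBest_head_nomatch p ps used pairs none h
          rw [show (Option.map (fun ri : Nat × Int => (ri.1 + 1, ri.2)) none) = (none : Option (Nat × Int)) from rfl] at h2
          rw [h2, Option.map_map]
          show (pvBBest ps used pairs none).map (·.2) = pvAPick used pairs (p :: ps)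
          rw [ih]
          simp [pvAPick, h]

-- the two outer loops agree step by step
theorem pvBLoop_eq_pvALoop (headers : List String) (pairs : List (Int × String))
    (ms : List (String × List String)) (m : PySem.Dict String String) (used : PySem.Set Int) :
    pvBLoop headers pairs ms m used = pvALoop headers pairs ms m used := by
  induction ms generalizing m used with
  | nil => rfl
  | cons hd rest ih =>
      obtain ⟨canonical, phrases⟩ := hd
      simp only [pvBLoop, pvALoop]
      cases hB : pvBBest phrases used pairs none with
      | none =>
          have hA : pvAPick used pairs phrases = none := by
            rw [← pvBBest_eq_pvAPick, hB]; rfl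
          rw [hA]
          exact ih m used
      | some ri =>
          obtain ⟨r, i⟩ := ri
          have hA : pvAPick used pairs phrases = some i := by
            rw [← pvBBest_eq_pvAPick, hB]; rfl
          rw [hA]
          exact ih _ _

-- ===== VERDICT (by name: the statement is the Claim_ definition above) =====
theorem smart_match_columns_py_spec : Claim_equal_smart_match_columns_py := by
  intro headers _
  exact congrArg PySem.Dict.items
    (pvBLoop_eq_pvALoop headers
      (PySem.List.enumerate (headers.map (fun h => PySem.Str.lower (PySem.Str.strip h))) 0)
      pvMatchers PySem.Dict.empty PySem.Set.empty).symm
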